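-- pv_equiv track=rewrite | github.com/hughcapet/patroni | patroni/ctl.py | generate_topology
-- ===== SOURCE A (Python) =====
-- def generate_topology(level, member, topology):
--     members = topology.get(member['name'], [])
--
--     if level > 0:
--         member['name'] = '{0}+ {1}'.format((' ' * (level - 1) * 2), member['name'])
--
--     if member['name']:
--         yield member
--
--     for member in members:
--         for member in generate_topology(level + 1, member, topology):
--             yield member
-- ===== SOURCE B (Python) =====
-- def generate_topology(level, member, topology):
--     # Iterative pre-order DFS with an explicit stack instead of recursion.
--     stack = [(level, member)]
--     while stack:
--         lvl, m = stack.pop()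
--         children = topology.get(m['name'], [])
--         if lvl > 0:
--             m['name'] = (' ' * (lvl - 1) * 2) + '+ ' + m['name']
--         if m['name']:
--             yield m
--         for child in reversed(children):
--             stack.append((lvl + 1, child))
-- ===== Notes on version B (the rewrite author's own statement) =====
-- stated objective: alternative
-- what changed: The recursive DFS generator is replaced by an iterative loop over an explicit stack of (level, member) pairs (children looked up before the rename, pushed reversed so pop order keeps the pre-order), removing recursion entirely.
import Mathlib
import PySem

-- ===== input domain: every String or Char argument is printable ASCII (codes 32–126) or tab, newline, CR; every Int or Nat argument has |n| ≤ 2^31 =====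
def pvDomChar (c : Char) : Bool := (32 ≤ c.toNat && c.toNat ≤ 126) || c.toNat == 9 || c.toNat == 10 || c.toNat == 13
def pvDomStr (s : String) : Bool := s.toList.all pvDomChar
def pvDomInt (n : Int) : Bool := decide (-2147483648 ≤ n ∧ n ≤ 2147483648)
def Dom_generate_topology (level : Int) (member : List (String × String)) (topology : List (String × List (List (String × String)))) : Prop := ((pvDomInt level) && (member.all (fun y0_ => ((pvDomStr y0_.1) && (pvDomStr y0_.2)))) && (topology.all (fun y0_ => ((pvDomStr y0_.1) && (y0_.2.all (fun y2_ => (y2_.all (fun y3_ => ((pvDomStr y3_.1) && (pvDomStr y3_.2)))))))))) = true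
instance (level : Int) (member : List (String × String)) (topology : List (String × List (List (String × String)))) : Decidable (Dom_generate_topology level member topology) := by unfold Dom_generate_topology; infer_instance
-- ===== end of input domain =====

-- B replaces A's recursive DFS generator by an iterative loop over an explicit stack of
-- (level, member) pairs; same yielded sequence, different decomposition (no recursion).
-- Both Pythons mutate the SHARED member dicts in place (member['name'] = …); both ports model
-- that mutation exactly, with a heap of numbered dict objects (root = 0, topology's dicts in
-- order of occurrence), so the collected output shows each object's FINAL state, as Python does.

-- ===== shared heap encoding of Python's object identity (scaffolding used by BOTH ports) =====
-- heap: object id ↦ current dict; id 0 is the `member` argument, ids 1.. the dicts inside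
-- `topology`'s values in order of occurrence
def pvHeap0 (member : List (String × String)) (topology : List (String × List (List (String × String)))) :
    List (PySem.Dict String String) :=
  PySem.Dict.ofList member :: (topology.flatMap (·.2)).map PySem.Dict.ofList

-- assign consecutive ids to the dicts of each topology entry
def pvAssign : Nat → List (String × List (List (String × String))) → List (String × List Nat)
  | _, [] => []
  | i, (k, chs) :: rest => (k, List.range' i chs.length) :: pvAssign (i + chs.length) rest

-- the Python dict `topology`, with each member dict replaced by its heap id
def pvTopoIds (topology : List (String × List (List (String × String)))) : PySem.Dict String (List Nat) :=
  PySem.Dict.ofList (pvAssign 1 topology)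

def pvHGet (h : List (PySem.Dict String String)) (i : Nat) : PySem.Dict String String :=
  (h[i]?).getD (PySem.Dict.ofList [])

-- '{0}+ {1}'.format(' ' * (level-1) * 2, name): exact — Python's s*k is '' for k ≤ 0,
-- matching pyRepeat's toNat clamping
def pvIndentName (level : Int) (name : String) : String :=
  String.ofList (PySem.List.pyRepeat (PySem.List.pyRepeat [' '] (level - 1)) 2 ++ ('+' :: ' ' :: name.toList))

-- recursion-depth fuel, a totality guard only (generous bound; inside Pre_ Python's recursion
-- terminates within it, and where it would not Python raises RecursionError, outside Pre_)
def pvFuel (topology : List (String × List (List (String × String)))) : Nat :=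
  1000 + topology.length +
    ((topology.flatMap (·.2)).length + 1) * ((topology.map (fun kv => kv.1.length)).foldl max 0 + 8)

-- ===== PORT A =====
-- A's recursive generator, state-threading the heap; returns (final heap, yielded ids)
def pvRunA (tids : PySem.Dict String (List Nat)) :
    Nat → Int → Nat → List (PySem.Dict String String) →
    (List (PySem.Dict String String)) × List Nat
  | 0, _, _, h => (h, [])
  | Nat.succ f, level, id, h =>
    let md := pvHGet h id
    match PySem.Dict.get? md "name" with
    | none => (h, [])                    -- member['name'] raises KeyError: outside Pre_
    | some name0 =>
      let children := PySem.Dict.getD tids name0 []        -- topology.get(member['name'], [])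
      let md' := if level > 0 then PySem.Dict.insert md "name" (pvIndentName level name0) else md
      let h1 := h.set id md'                               -- in-place mutation of the object
      let cur := (PySem.Dict.get? md' "name").getD ""      -- re-read member['name'] for truthiness
      children.foldl (fun s c => let r := pvRunA tids f (level + 1) c s.1; (r.1, s.2 ++ r.2))
        (h1, if cur ≠ "" then [id] else [])

def generate_topology (level : Int) (member : List (String × String)) (topology : List (String × List (List (String × String)))) : List (List (String × String)) :=
  let r := pvRunA (pvTopoIds topology) (pvFuel topology) level 0 (pvHeap0 member topology)
  r.2.map (fun i => (pvHGet r.1 i).items)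

-- ===== PORT B =====
-- bound on how many children any single topology.get can return (for the termination measure)
def pvChildBound (tids : PySem.Dict String (List Nat)) : Nat :=
  (tids.items.map (fun kv => kv.2.length)).sum

theorem pvGetD_length_le (tids : PySem.Dict String (List Nat)) (k : String) :
    (PySem.Dict.getD tids k []).length ≤ pvChildBound tids := by
  rw [PySem.Dict.getD_eq_get?_getD]
  rcases h : PySem.Dict.get? tids k with _ | v
  · simp
  · simp only [Option.getD_some]
    have hm : (k, v) ∈ tids.items := PySem.Dict.mem_items_of_get?_eq_some _ h
    unfold pvChildBound
    calc v.length = (fun kv => (kv.2).length) (k, v) := rfl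
      _ ≤ _ := List.le_sum_of_mem (List.mem_map_of_mem (f := fun kv => (kv.2).length) hm)

-- the while-loop over the stack; Python pushes reversed(children) and pops from the END,
-- modelled head-first: the children are PREPENDED in order.  Each stack entry carries the
-- remaining depth fuel (totality guard only; never exhausted inside Pre_).
def pvRunB (tids : PySem.Dict String (List Nat)) :
    List (Nat × Int × Nat) → List (PySem.Dict String String) → List Nat →
    (List (PySem.Dict String String)) × List Nat
  | [], h, acc => (h, acc)
  | (0, _, _) :: st, h, acc => pvRunB tids st h acc
  | (Nat.succ f, lvl, id) :: st, h, acc =>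
    let md := pvHGet h id
    match PySem.Dict.get? md "name" with
    | none => pvRunB tids st h acc       -- m['name'] raises KeyError: outside Pre_
    | some name0 =>
      let children := PySem.Dict.getD tids name0 []
      let md' := if lvl > 0 then PySem.Dict.insert md "name" (pvIndentName lvl name0) else md
      let cur := (PySem.Dict.get? md' "name").getD ""
      pvRunB tids (children.map (fun c => (f, lvl + 1, c)) ++ st) (h.set id md')
        (if cur ≠ "" then acc ++ [id] else acc)
termination_by stack => (stack.map (fun e => (pvChildBound tids + 2) ^ e.1)).sum
decreasing_by
  · simp
  · simp
  · simp only [List.map_append, List.sum_append, List.map_cons, List.sum_cons, List.map_map]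
    have h1 : (List.map ((fun e => (pvChildBound tids + 2) ^ e.1) ∘ fun c => (f, lvl + 1, c))
          (tids.getD name0 [])).sum
        = (tids.getD name0 []).length * (pvChildBound tids + 2) ^ f := by
      simp [Function.comp_def, List.map_const', List.sum_replicate, smul_eq_mul, Nat.mul_comm]
    rw [h1]
    have h2 : (tids.getD name0 []).length ≤ pvChildBound tids := pvGetD_length_le tids name0
    have h3 : 0 < (pvChildBound tids + 2) ^ f := pow_pos (by omega) f
    have h4 : (tids.getD name0 []).length * (pvChildBound tids + 2) ^ f
        < (pvChildBound tids + 2) ^ (f + 1) := by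
      rw [pow_succ, Nat.mul_comm ((pvChildBound tids + 2) ^ f)]
      exact Nat.mul_lt_mul_of_lt_of_le (by omega) (le_refl _) h3
    have h5 : (pvChildBound tids + 2) ^ f.succ = (pvChildBound tids + 2) ^ (f + 1) := rfl
    omega

def generate_topology_alt (level : Int) (member : List (String × String)) (topology : List (String × List (List (String × String)))) : List (List (String × String)) :=
  let r := pvRunB (pvTopoIds topology) [(pvFuel topology, level, 0)] (pvHeap0 member topology) []
  r.2.map (fun i => (pvHGet r.1 i).items)

-- ===== PRECONDITION & SPEC =====
-- Pre_ excludes exactly two kinds of input, both because Python A raises there: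
-- (a) inputs with a member dict without a 'name' key under a topology key reachable (in the
--     static name graph) from the root member's name — A raises KeyError when it reaches such a
--     dict (dicts under an overwritten duplicate key are excluded with them, closed-form);
-- (b) a starting level below -400 combined with a cyclic name graph — following a reachable
--     cycle A's recursion depth grows with |level| and overflows Python's stack
--     (RecursionError around level -1000); unreachable cycles are excluded with them, to keep
--     the condition closed-form.
def pvHasName (m : List (String × String)) : Bool :=
  (PySem.Dict.get? (PySem.Dict.ofList m) "name").isSome

-- original names of the member dicts under key k (the static name graph's out-edges)
def pvChildNames (topology : List (String × List (List (String × String)))) (k : String) : List String :=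
  (PySem.Dict.getD (PySem.Dict.ofList topology) k []).map
    (fun m => PySem.Dict.getD (PySem.Dict.ofList m) "name" "")

def pvReach (topology : List (String × List (List (String × String)))) :
    Nat → List String → List String
  | 0, s => s
  | n + 1, s => pvReach topology n ((s ++ s.flatMap (pvChildNames topology)).dedup)

def pvAcyclic (topology : List (String × List (List (String × String)))) : Bool :=
  (PySem.Dict.ofList topology).keys.all
    (fun k => !(k ∈ pvReach topology (topology.length + (topology.flatMap (·.2)).length)
                  (pvChildNames topology k)))

-- all names reachable from the root member's name in the static name graph
def pvReachNames (member : List (String × String)) (topology : List (String × List (List (String × String)))) : List String :=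
  pvReach topology (topology.length + (topology.flatMap (·.2)).length)
    [PySem.Dict.getD (PySem.Dict.ofList member) "name" ""]

def Pre_generate_topology (level : Int) (member : List (String × String)) (topology : List (String × List (List (String × String)))) : Prop :=
  pvHasName member = true ∧
    topology.all (fun kv => !(kv.1 ∈ pvReachNames member topology) || kv.2.all pvHasName) = true ∧
    (-400 ≤ level ∨ pvAcyclic topology = true)

instance (level : Int) (member : List (String × String)) (topology : List (String × List (List (String × String)))) : Decidable (Pre_generate_topology level member topology) := by unfold Pre_generate_topology; infer_instance

def pvWitness_generate_topology : Int × (List (String × String)) × (List (String × List (List (String × String)))) :=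
  (0, [("name", "a")], [("a", [[("name", "b")], [("name", "b")]]), ("b", [[("name", "c")]])])

def Spec_generate_topology (level : Int) (member : List (String × String)) (topology : List (String × List (List (String × String)))) (out : List (List (String × String))) : Prop := out = generate_topology_alt level member topology
instance (level : Int) (member : List (String × String)) (topology : List (String × List (List (String × String)))) (out : List (List (String × String))) : Decidable (Spec_generate_topology level member topology out) := by unfold Spec_generate_topology; infer_instance

-- ===== CLAIM =====
def Claim_equal_generate_topology : Prop := ∀ (level : Int) (member : List (String × String)) (topology : List (String × List (List (String × String)))), Dom_generate_topology level member topology → Pre_generate_topology level member topology → Spec_generate_topology level member topology (generate_topology level member topology)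

-- ===== LEMMAS AND PROOFS =====

-- run A's recursion over a list of stack entries in order, threading the heap
def pvRunList (tids : PySem.Dict String (List Nat)) :
    List (Nat × Int × Nat) → List (PySem.Dict String String) →
    (List (PySem.Dict String String)) × List Nat
  | [], h => (h, [])
  | e :: es, h =>
    let r := pvRunA tids e.1 e.2.1 e.2.2 h
    let s := pvRunList tids es r.1
    (s.1, r.2 ++ s.2)

theorem pvRunList_append (tids : PySem.Dict String (List Nat))
    (xs ys : List (Nat × Int × Nat)) (h : List (PySem.Dict String String)) :
    pvRunList tids (xs ++ ys) h =
      ((pvRunList tids ys (pvRunList tids xs h).1).1,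
       (pvRunList tids xs h).2 ++ (pvRunList tids ys (pvRunList tids xs h).1).2) := by
  induction xs generalizing h with
  | nil => simp [pvRunList]
  | cons e es ih => simp [pvRunList, ih]

-- A's for-loop over the children equals running the child entries as a list
theorem pvFoldl_eq_runList (tids : PySem.Dict String (List Nat)) (f : Nat) (L : Int)
    (children : List Nat) (h : List (PySem.Dict String String)) (ys : List Nat) :
    children.foldl (fun s c => let r := pvRunA tids f L c s.1; (r.1, s.2 ++ r.2)) (h, ys) =
      ((pvRunList tids (children.map (fun c => (f, L, c))) h).1,
       ys ++ (pvRunList tids (children.map (fun c => (f, L, c))) h).2) := by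
  induction children generalizing h ys with
  | nil => simp [pvRunList]
  | cons c cs ih => simp [pvRunList, ih, List.foldl_cons]

-- the stack loop computes acc ++ the ids of A's recursion run over the stack entries,
-- with the same final heap
theorem pvRunB_eq (tids : PySem.Dict String (List Nat))
    (stack : List (Nat × Int × Nat)) (h : List (PySem.Dict String String)) (acc : List Nat) :
    pvRunB tids stack h acc = ((pvRunList tids stack h).1, acc ++ (pvRunList tids stack h).2) := by
  fun_induction pvRunB tids stack h acc with
  | case1 h acc => simp [pvRunList]
  | case2 f lvl st h acc ih =>
    rw [ih]; simp [pvRunList, pvRunA]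
  | case3 f lvl id st h acc md hnone ih =>
    rw [ih]
    have : pvRunA tids (Nat.succ f) lvl id h = (h, []) := by
      simp only [pvRunA]; rw [hnone]
    simp [pvRunList, this]
  | case4 f lvl id st h acc md name0 hget children md' cur ih =>
    simp only [dite_eq_ite] at ih
    rw [ih, pvRunList_append]
    have hA : pvRunA tids (Nat.succ f) lvl id h =
        ((pvRunList tids (children.map (fun c => (f, lvl + 1, c))) (h.set id md')).1,
         (if cur ≠ "" then [id] else []) ++
           (pvRunList tids (children.map (fun c => (f, lvl + 1, c))) (h.set id md')).2) := by
      simp only [pvRunA]; rw [hget]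
      exact pvFoldl_eq_runList tids f (lvl + 1) children (h.set id md') _
    simp only [pvRunList, hA]
    split_ifs <;> simp

theorem generate_topology_spec : Claim_equal_generate_topology := by
  intro level member topology _ _
  unfold Spec_generate_topology generate_topology generate_topology_alt
  rw [pvRunB_eq]
  simp [pvRunList]
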